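-- pv_equiv track=rewrite | github.com/gaelic-ghost/socket | plugins/productivity-skills/skills/maintain-project-contributing/scripts/maintain_project_contributing.py | parse_title_and_summary
-- ===== SOURCE A (Python) =====
-- from typing import Dict, List, Optional, Sequence, Tuple
--
-- def parse_title_and_summary(preamble: str) -> Tuple[Optional[str], Optional[str], List[str]]:
--     lines = [line.rstrip() for line in preamble.splitlines()]
--     title: Optional[str] = None
--     summary: Optional[str] = None
--     extras: List[str] = []
--     title_index: Optional[int] = None
--     summary_index: Optional[int] = None
--
--     for idx, line in enumerate(lines):
--         if line.startswith("# "):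
--             title = line[2:].strip()
--             title_index = idx
--             break
--
--     if title_index is None:
--         return None, None, lines
--
--     for idx in range(title_index + 1, len(lines)):
--         if lines[idx].strip():
--             summary = lines[idx].strip()
--             summary_index = idx
--             break
--
--     for idx, line in enumerate(lines):
--         if idx in {title_index, summary_index}:
--             continue
--         extras.append(line)
--
--     return title, summary, extras
-- ===== SOURCE B (Python) =====
-- def parse_title_and_summary(preamble):
--     title = None
--     summary = None
--     extras = []
--     phase = "seek_title"
--     for line in (raw.rstrip() for raw in preamble.splitlines()):
--         if phase == "seek_title":
--             if line.startswith("# "):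
--                 title = line[2:].strip()
--                 phase = "seek_summary"
--             else:
--                 extras.append(line)
--         elif phase == "seek_summary":
--             if line.strip():
--                 summary = line.strip()
--                 phase = "rest"
--             else:
--                 extras.append(line)
--         else:
--             extras.append(line)
--     return title, summary, extras
-- ===== Notes on version B (the rewrite author's own statement) =====
-- stated objective: simpler
-- what changed: Replaced A's three separate passes (title index scan, summary index scan from title_index+1, and a third full pass filtering out the two recorded indices) by one single pass over the rstripped lines driven by a phase variable, with no index bookkeeping.
import Mathlib
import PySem

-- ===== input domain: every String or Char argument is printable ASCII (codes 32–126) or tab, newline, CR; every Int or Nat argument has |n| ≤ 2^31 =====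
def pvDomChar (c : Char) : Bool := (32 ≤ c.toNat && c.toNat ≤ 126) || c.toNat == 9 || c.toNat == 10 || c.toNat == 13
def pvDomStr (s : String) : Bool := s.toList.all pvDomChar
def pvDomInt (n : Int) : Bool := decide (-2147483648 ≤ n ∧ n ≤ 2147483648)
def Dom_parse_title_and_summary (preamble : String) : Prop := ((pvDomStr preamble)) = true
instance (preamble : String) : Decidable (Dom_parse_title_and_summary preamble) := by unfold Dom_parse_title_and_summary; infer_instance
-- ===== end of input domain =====

-- B replaces A's three separate passes (title scan, summary index scan, index-set filtered extras pass)
-- by one single pass with a phase variable; objective: simpler (one traversal, no index bookkeeping).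

-- ===== PORT A =====
-- first loop: for idx, line in enumerate(lines): if line.startswith("# "): title, title_index; break
def pvA_findTitle : List String → Nat → Option (Nat × String)
  | [], _ => none
  | l :: ls, i =>
    if PySem.Str.startswith l "# " then
      some (i, PySem.Str.strip (PySem.Str.slice l (some 2) none))
    else pvA_findTitle ls (i + 1)

-- second loop: for idx in range(title_index + 1, len(lines)): if lines[idx].strip(): …; break
def pvA_findSummary (lines : List String) (idx : Nat) : Option (Nat × String) :=
  if h : idx < lines.length then
    if PySem.Str.strip lines[idx] ≠ "" then some (idx, PySem.Str.strip lines[idx])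
    else pvA_findSummary lines (idx + 1)
  else none
termination_by lines.length - idx

-- third loop: for idx, line in enumerate(lines): skip idx ∈ {title_index, summary_index}; extras.append(line)
def pvA_extras (ti : Nat) (si : Option Nat) : List String → Nat → List String → List String
  | [], _, acc => acc
  | l :: ls, i, acc =>
    pvA_extras ti si ls (i + 1) (if i = ti ∨ si = some i then acc else acc ++ [l])

def parse_title_and_summary (preamble : String) : Option String × Option String × List String :=
  let lines := (PySem.Str.splitlines preamble).map PySem.Str.rstrip
  match pvA_findTitle lines 0 with
  | none => (none, none, lines)
  | some (ti, title) =>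
    match pvA_findSummary lines (ti + 1) with
    | none => (some title, none, pvA_extras ti none lines 0 [])
    | some (si, summary) => (some title, some summary, pvA_extras ti (some si) lines 0 [])

-- ===== PORT B =====
-- single pass; phase 0 = seek_title, 1 = seek_summary, 2 = rest
def pvB_go : List String → Nat → Option String → Option String → List String →
    Option String × Option String × List String
  | [], _, title, summary, extras => (title, summary, extras)
  | l :: ls, phase, title, summary, extras =>
    if phase = 0 then
      if PySem.Str.startswith l "# " then
        pvB_go ls 1 (some (PySem.Str.strip (PySem.Str.slice l (some 2) none))) summary extras
      else pvB_go ls 0 title summary (extras ++ [l])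
    else if phase = 1 then
      if PySem.Str.strip l ≠ "" then pvB_go ls 2 title (some (PySem.Str.strip l)) extras
      else pvB_go ls 1 title summary (extras ++ [l])
    else pvB_go ls 2 title summary (extras ++ [l])

def parse_title_and_summary_alt (preamble : String) : Option String × Option String × List String :=
  pvB_go ((PySem.Str.splitlines preamble).map PySem.Str.rstrip) 0 none none []

-- ===== PRECONDITION & SPEC =====
def Spec_parse_title_and_summary (preamble : String) (out : Option String × Option String × List String) : Prop := out = parse_title_and_summary_alt preamble
instance (preamble : String) (out : Option String × Option String × List String) : Decidable (Spec_parse_title_and_summary preamble out) := by unfold Spec_parse_title_and_summary; infer_instance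

-- ===== CLAIM (what is proved, stated in full; the proofs are below) =====
def Claim_equal_parse_title_and_summary : Prop := ∀ (preamble : String), Dom_parse_title_and_summary preamble → Spec_parse_title_and_summary preamble (parse_title_and_summary preamble)

-- ===== LEMMAS AND PROOFS =====

-- A-side characterizations ------------------------------------------------

theorem pvA_findTitle_none (ls : List String) (i : Nat)
    (h : ∀ l ∈ ls, PySem.Str.startswith l "# " = false) :
    pvA_findTitle ls i = none := by
  induction ls generalizing i with
  | nil => rfl
  | cons l ls ih =>
    rw [pvA_findTitle, h l (by simp)]
    simp only [Bool.false_eq_true, if_false]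
    exact ih _ (fun x hx => h x (by simp [hx]))

theorem pvA_findTitle_found (P : List String) (t : String) (R : List String) (i : Nat)
    (hP : ∀ l ∈ P, PySem.Str.startswith l "# " = false)
    (ht : PySem.Str.startswith t "# " = true) :
    pvA_findTitle (P ++ t :: R) i
      = some (i + P.length, PySem.Str.strip (PySem.Str.slice t (some 2) none)) := by
  induction P generalizing i with
  | nil => rw [List.nil_append, pvA_findTitle, ht]; simp
  | cons l P ih =>
    rw [List.cons_append, pvA_findTitle, hP l (by simp)]
    simp only [Bool.false_eq_true, if_false]
    rw [ih _ (fun x hx => hP x (by simp [hx]))]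
    simp only [List.length_cons, Option.some.injEq, Prod.mk.injEq, and_true]
    omega

theorem pvA_findSummary_none (lines : List String) (s : Nat)
    (h : ∀ l ∈ lines.drop s, PySem.Str.strip l = "") :
    pvA_findSummary lines s = none := by
  fun_induction pvA_findSummary lines s
  case case1 a b c =>
    have hmem : lines[a] ∈ lines.drop a := by
      have h0 : (lines.drop a)[0]'(by simp; omega) = lines[a] := by
        simp [List.getElem_drop]
      rw [← h0]; exact List.getElem_mem _
    exact absurd (h _ hmem) c
  case case2 a b c d =>
    refine d (fun l hl => h l ?_)
    have heq : lines.drop (a + 1) = (lines.drop a).drop 1 := by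
      rw [List.drop_drop, Nat.add_comm]
    rw [heq] at hl
    exact List.mem_of_mem_drop hl
  case case3 a b => rfl

theorem pvA_findSummary_found (Q : List String) (lines : List String) (s : Nat)
    (v : String) (S : List String)
    (hdrop : lines.drop s = Q ++ v :: S)
    (hQ : ∀ l ∈ Q, PySem.Str.strip l = "")
    (hv : PySem.Str.strip v ≠ "") :
    pvA_findSummary lines s = some (s + Q.length, PySem.Str.strip v) := by
  induction Q generalizing s with
  | nil =>
    have hs : s < lines.length := by
      by_contra hge
      have : lines.drop s = [] := List.drop_eq_nil_of_le (by omega)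
      simp [this] at hdrop
    have hv' : lines[s] = v := by
      have h0 : (lines.drop s)[0]'(by simp [hdrop]) = v := by simp [hdrop]
      rw [List.getElem_drop] at h0; simpa using h0
    rw [pvA_findSummary, dif_pos hs, hv', if_pos hv]
    simp
  | cons q Q ih =>
    have hs : s < lines.length := by
      by_contra hge
      have : lines.drop s = [] := List.drop_eq_nil_of_le (by omega)
      simp [this] at hdrop
    have hq : lines[s] = q := by
      have h0 : (lines.drop s)[0]'(by simp [hdrop]) = q := by simp [hdrop]
      rw [List.getElem_drop] at h0; simpa using h0
    have hdrop' : lines.drop (s + 1) = Q ++ v :: S := by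
      have := congrArg (List.drop 1) hdrop
      simpa [List.drop_drop, Nat.add_comm] using this
    rw [pvA_findSummary, dif_pos hs, hq, if_neg (by simp [hQ q (by simp)])]
    rw [ih _ hdrop' (fun x hx => hQ x (by simp [hx]))]
    simp only [List.length_cons, Option.some.injEq, Prod.mk.injEq, and_true]
    omega

theorem pvA_extras_seg (ti : Nat) (si : Option Nat) (xs ys : List String) (i : Nat)
    (acc : List String)
    (h : ∀ j < xs.length, ¬(i + j = ti ∨ si = some (i + j))) :
    pvA_extras ti si (xs ++ ys) i acc = pvA_extras ti si ys (i + xs.length) (acc ++ xs) := by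
  induction xs generalizing i acc with
  | nil => simp
  | cons x xs ih =>
    have h0 : ¬(i = ti ∨ si = some i) := by simpa using h 0 (by simp)
    rw [List.cons_append, pvA_extras, if_neg h0]
    rw [ih _ _ (by intro j hj
                   have := h (j + 1) (by simp; omega)
                   simpa [Nat.add_assoc, Nat.add_comm 1 j] using this)]
    simp [Nat.add_assoc, Nat.add_comm 1 xs.length]

theorem pvA_extras_rest (ti : Nat) (si : Option Nat) (xs : List String) (i : Nat)
    (acc : List String)
    (h : ∀ j < xs.length, ¬(i + j = ti ∨ si = some (i + j))) :
    pvA_extras ti si xs i acc = acc ++ xs := by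
  have := pvA_extras_seg ti si xs [] i acc h
  rw [List.append_nil] at this
  simpa [pvA_extras] using this

theorem pvA_extras_skip (ti : Nat) (si : Option Nat) (l : String) (ls : List String)
    (i : Nat) (acc : List String) (h : i = ti ∨ si = some i) :
    pvA_extras ti si (l :: ls) i acc = pvA_extras ti si ls (i + 1) acc := by
  rw [pvA_extras, if_pos h]

-- B-side characterizations ------------------------------------------------

theorem pvB_go_seek (P rest : List String) (extras : List String)
    (hP : ∀ l ∈ P, PySem.Str.startswith l "# " = false) :
    pvB_go (P ++ rest) 0 none none extras = pvB_go rest 0 none none (extras ++ P) := by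
  induction P generalizing extras with
  | nil => simp
  | cons l P ih =>
    have hl := hP l (by simp)
    rw [List.cons_append, pvB_go.eq_def]
    simp only [hl]
    norm_num
    rw [ih _ (fun x hx => hP x (by simp [hx]))]
    simp

theorem pvB_go_blank (Q rest : List String) (t : Option String) (extras : List String)
    (hQ : ∀ l ∈ Q, PySem.Str.strip l = "") :
    pvB_go (Q ++ rest) 1 t none extras = pvB_go rest 1 t none (extras ++ Q) := by
  induction Q generalizing extras with
  | nil => simp
  | cons l Q ih =>
    have hl : PySem.Str.strip l = "" := hQ l (by simp)
    rw [List.cons_append, pvB_go.eq_def]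
    simp only [hl]
    norm_num
    rw [ih _ (fun x hx => hQ x (by simp [hx]))]
    simp

theorem pvB_go_rest (xs : List String) (t s : Option String) (extras : List String) :
    pvB_go xs 2 t s extras = (t, s, extras ++ xs) := by
  induction xs generalizing extras with
  | nil => simp [pvB_go]
  | cons l ls ih =>
    rw [pvB_go.eq_def]
    norm_num
    rw [ih]; simp

-- main list-level equivalence ----------------------------------------------

theorem pv_main (lines : List String) :
    (match pvA_findTitle lines 0 with
      | none => ((none : Option String), (none : Option String), lines)
      | some (ti, title) =>
        match pvA_findSummary lines (ti + 1) with
        | none => (some title, none, pvA_extras ti none lines 0 [])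
        | some (si, summary) => (some title, some summary, pvA_extras ti (some si) lines 0 []))
      = pvB_go lines 0 none none [] := by
  have hsplitT := List.takeWhile_append_dropWhile
    (p := fun l => !PySem.Str.startswith l "# ") (l := lines)
  have hPmem : ∀ l ∈ lines.takeWhile (fun l => !PySem.Str.startswith l "# "),
      PySem.Str.startswith l "# " = false := by
    intro l hl
    simpa using List.mem_takeWhile_imp hl
  cases hdT : lines.dropWhile (fun l => !PySem.Str.startswith l "# ") with
  | nil =>
    have hall : lines.takeWhile (fun l => !PySem.Str.startswith l "# ") = lines := by
      rw [hdT] at hsplitT; simpa using hsplitT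
    have hAllNoT : ∀ l ∈ lines, PySem.Str.startswith l "# " = false := by
      intro l hl; rw [← hall] at hl; exact hPmem l hl
    rw [pvA_findTitle_none lines 0 hAllNoT]
    conv_rhs => rw [← List.append_nil lines]
    rw [pvB_go_seek lines [] [] hAllNoT]
    simp [pvB_go]
  | cons t R =>
    rw [hdT] at hsplitT
    have hPmem' := hPmem
    set P := lines.takeWhile (fun l => !PySem.Str.startswith l "# ") with hPdef
    have ht : PySem.Str.startswith t "# " = true := by
      have := List.head_dropWhile_not
        (p := fun l => !PySem.Str.startswith l "# ") (l := lines) (by rw [hdT]; exact List.cons_ne_nil _ _)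
      simp only [hdT, List.head_cons, Bool.not_eq_false'] at this
      exact this
    have hdropR : lines.drop (P.length + 1) = R := by
      conv_lhs => rw [← hsplitT]
      rw [show P.length + 1 = (P ++ [t]).length by simp,
          show P ++ t :: R = (P ++ [t]) ++ R by simp]
      exact List.drop_left
    -- A's title scan
    conv_lhs => rw [← hsplitT]
    rw [pvA_findTitle_found P t R 0 hPmem' ht, hsplitT]
    simp only [Nat.zero_add]
    -- B reaches phase 1 after P and t
    conv_rhs => rw [← hsplitT]
    rw [pvB_go_seek P (t :: R) [] hPmem', pvB_go.eq_def]
    simp only [ht]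
    norm_num
    -- now split R at the first non-blank line
    have hsplitB := List.takeWhile_append_dropWhile
      (p := fun l => PySem.Str.strip l == "") (l := R)
    have hQmem : ∀ l ∈ R.takeWhile (fun l => PySem.Str.strip l == ""),
        PySem.Str.strip l = "" := by
      intro l hl
      simpa using List.mem_takeWhile_imp hl
    cases hdB : R.dropWhile (fun l => PySem.Str.strip l == "") with
    | nil =>
      have hallB : R.takeWhile (fun l => PySem.Str.strip l == "") = R := by
        rw [hdB] at hsplitB; simpa using hsplitB
      have hAllBlank : ∀ l ∈ R, PySem.Str.strip l = "" := by
        intro l hl; rw [← hallB] at hl; exact hQmem l hl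
      rw [pvA_findSummary_none lines (P.length + 1) (by rw [hdropR]; exact hAllBlank)]
      conv_rhs => rw [← List.append_nil R]
      rw [pvB_go_blank R [] _ P hAllBlank]
      -- A's extras with si = none
      conv_lhs => rw [← hsplitT]
      rw [pvA_extras_seg P.length none P (t :: R) 0 []
            (by intro j hj; simp; omega)]
      simp only [Nat.zero_add, List.nil_append]
      rw [pvA_extras_skip _ _ _ _ _ _ (Or.inl rfl),
          pvA_extras_rest P.length none R (P.length + 1) P
            (by intro j hj; simp; omega)]
      simp [pvB_go]
    | cons v S =>
      rw [hdB] at hsplitB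
      have hQmem' := hQmem
      set Q := R.takeWhile (fun l => PySem.Str.strip l == "") with hQdef
      have hvB : PySem.Str.strip v ≠ "" := by
        have := List.head_dropWhile_not
          (p := fun l => PySem.Str.strip l == "") (l := R) (by rw [hdB]; exact List.cons_ne_nil _ _)
        simp only [hdB, List.head_cons, beq_eq_false_iff_ne, ne_eq] at this
        exact this
      have hdropQ : lines.drop (P.length + 1) = Q ++ v :: S := by
        rw [hdropR, ← hsplitB]
      rw [pvA_findSummary_found Q lines (P.length + 1) v S hdropQ hQmem' hvB]
      -- B side: consume Q blanks, then v, then the rest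
      conv_rhs => rw [← hsplitB]
      rw [pvB_go_blank Q (v :: S) _ P hQmem', pvB_go.eq_def]
      norm_num
      rw [if_neg (fun h => hvB h), pvB_go_rest]
      -- A's extras with si = some (P.length + 1 + Q.length)
      conv_lhs => rw [← hsplitT, ← hsplitB]
      rw [pvA_extras_seg P.length (some (P.length + 1 + Q.length)) P
            (t :: (Q ++ v :: S)) 0 []
            (by intro j hj; simp; omega)]
      simp only [Nat.zero_add, List.nil_append]
      rw [pvA_extras_skip _ _ _ _ _ _ (Or.inl rfl),
          pvA_extras_seg P.length (some (P.length + 1 + Q.length)) Q (v :: S)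
            (P.length + 1) P
            (by intro j hj; simp; omega),
          pvA_extras_skip _ _ _ _ _ _ (Or.inr rfl),
          pvA_extras_rest P.length (some (P.length + 1 + Q.length)) S
            (P.length + 1 + Q.length + 1) (P ++ Q)
            (by intro j hj; simp; omega)]

-- ===== VERDICT (by name: the statement is the Claim_ definition above) =====
theorem parse_title_and_summary_spec : Claim_equal_parse_title_and_summary := by
  intro preamble _
  unfold Spec_parse_title_and_summary parse_title_and_summary parse_title_and_summary_alt
  exact pv_main _
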